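-- pv_equiv track=rewrite | github.com/gjoireh/cote-practice | 프로그래머스/LV2/코딩테스트 연습/월간 코드 챌린지 시즌2/2개 이하로 다른 비트/2개 이하로 다른 비트.py | solution
-- ===== SOURCE A (Python) =====
-- def solution(numbers):
--     answer = []
--     for n in numbers:
--         b = 1
--         temp = n
--         while True:
--             if temp & 1 == 0:
--                 break
--             temp >>= 1
--             b <<= 1
--
--         answer.append(n + b - (b>>1))
--     return answer
-- ===== SOURCE B (Python) =====
-- def solution(numbers):
--     # closed-form lowest-unset-bit: (n + 1) & ~n == 2^(number of trailing 1-bits of n)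
--     return [n + (b := (n + 1) & ~n) - (b >> 1) for n in numbers]
-- ===== Notes on version B (the rewrite author's own statement) =====
-- stated objective: simpler
-- what changed: Replaces the per-number while-loop that scans trailing 1-bits with the closed-form bit identity (n+1)&~n, collected by a single list comprehension instead of append-in-loop.
import Mathlib
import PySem

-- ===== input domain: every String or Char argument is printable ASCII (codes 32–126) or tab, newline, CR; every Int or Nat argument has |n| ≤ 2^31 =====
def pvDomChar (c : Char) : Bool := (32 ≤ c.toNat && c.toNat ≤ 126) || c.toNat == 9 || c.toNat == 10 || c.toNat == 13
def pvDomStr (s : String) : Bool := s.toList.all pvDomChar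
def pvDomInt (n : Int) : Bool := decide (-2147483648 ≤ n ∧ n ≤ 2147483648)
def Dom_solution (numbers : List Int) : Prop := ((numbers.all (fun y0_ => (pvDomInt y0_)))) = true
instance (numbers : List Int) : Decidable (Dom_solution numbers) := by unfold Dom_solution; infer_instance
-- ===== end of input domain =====

-- B replaces A's per-number trailing-ones scanning loop with the closed-form bit trick (n + 1) & ~n (simpler and loop-free per element).


-- ===== PORT A =====
-- `Int.shiftRight t 1` is Python's `temp >> 1` (arithmetic/floor shift); `t % 2 = 0` is
-- Python's `temp & 1 == 0` (Lean's Int emod 2 is 0/1, like Python's `& 1`); `b * 2` is `b <<= 1`.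
-- The extra `t = -1` guard only makes the recursion total: Python's loop never leaves -1
-- (it diverges there), and Pre_solution excludes -1, so the guard is never taken on Pre_.
theorem pvShiftOfNat (k : Nat) : Int.shiftRight (Int.ofNat k) 1 = Int.ofNat (k / 2) := by
  simp [Int.shiftRight, Nat.shiftRight_eq_div_pow]

theorem pvShiftNegSucc (p : Nat) : Int.shiftRight (Int.negSucc p) 1 = Int.negSucc (p / 2) := by
  simp [Int.shiftRight, Nat.shiftRight_eq_div_pow]

def solutionLoop (t : Int) (b : Int) : Int :=
  if t % 2 = 0 then b
  else if t = -1 then b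
  else solutionLoop (Int.shiftRight t 1) (b * 2)
termination_by t.natAbs
decreasing_by
  rename_i h1 h2
  rcases t with k | p
  · rw [pvShiftOfNat]
    show k / 2 < k
    simp only [Int.ofNat_eq_natCast] at h1
    omega
  · rw [pvShiftNegSucc]
    simp only [Int.natAbs_negSucc]
    rw [Int.negSucc_eq] at h2
    omega

def solution (numbers : List Int) : List Int :=
  numbers.foldl
    (fun answer n =>
      let b := solutionLoop n 1
      answer ++ [n + b - Int.shiftRight b 1])
    []

-- ===== PORT B =====
def solution_alt (numbers : List Int) : List Int :=
  numbers.map (fun n =>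
    let b := Int.land (n + 1) (-n - 1)  -- Python `(n + 1) & ~n`; `~n` is exactly `-n - 1`
    n + b - Int.shiftRight b 1)         -- Python `b >> 1` (arithmetic shift)

-- ===== PRECONDITION & SPEC =====
-- Pre_ excludes lists containing -1: there A's `while` loop never terminates
-- (temp stays -1, whose low bit is always 1), so A returns on no such input.
def Pre_solution (numbers : List Int) : Prop := ∀ n ∈ numbers, n ≠ -1
instance (numbers : List Int) : Decidable (Pre_solution numbers) := by unfold Pre_solution; infer_instance
def pvWitness_solution : List Int := [0, 1, 2, 7, -2, -3, 2147483647]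

def Spec_solution (numbers : List Int) (out : List Int) : Prop := out = solution_alt numbers
instance (numbers : List Int) (out : List Int) : Decidable (Spec_solution numbers out) := by unfold Spec_solution; infer_instance

-- ===== CLAIM (what is proved, stated in full; the proofs are below) =====
def Claim_equal_solution : Prop := ∀ (numbers : List Int), Dom_solution numbers → Pre_solution numbers → Spec_solution numbers (solution numbers)

-- ===== LEMMAS AND PROOFS =====
theorem ldiff_two_mul_odd_even (a b : Nat) : Nat.ldiff (2*a+1) (2*b) = 2 * Nat.ldiff a b + 1 := by
  have h := @Nat.bitwise_bit (fun x y => x && !y) rfl true a false b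
  simpa [Nat.bit, two_mul] using h

theorem ldiff_two_mul_even_odd (a b : Nat) : Nat.ldiff (2*a) (2*b+1) = 2 * Nat.ldiff a b := by
  have h := @Nat.bitwise_bit (fun x y => x && !y) rfl false a true b
  simpa [Nat.bit, two_mul] using h

theorem ldiff_self_eq_zero (m : Nat) : Nat.ldiff m m = 0 := by
  apply Nat.eq_of_testBit_eq; intro i; simp [Nat.testBit_ldiff]

theorem ldiff_succ_even (m : Nat) : Nat.ldiff (2*m+1) (2*m) = 1 := by
  rw [ldiff_two_mul_odd_even, ldiff_self_eq_zero]

theorem solutionLoop_ofNat (k : Nat) : ∀ b : Int,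
    solutionLoop (Int.ofNat k) b = b * ((Nat.ldiff (k+1) k : Nat) : Int) := by
  induction k using Nat.strong_induction_on with
  | _ k ih =>
    intro b
    rw [solutionLoop]
    by_cases h : k % 2 = 0
    · have hc : Int.ofNat k % 2 = 0 := by simp only [Int.ofNat_eq_natCast]; omega
      rw [if_pos hc]
      obtain ⟨m, rfl⟩ : ∃ m, k = 2*m := ⟨k/2, by omega⟩
      rw [ldiff_succ_even]
      simp
    · have hc : ¬ (Int.ofNat k % 2 = 0) := by simp only [Int.ofNat_eq_natCast]; omega
      have h1 : ¬ (Int.ofNat k = -1) := by simp only [Int.ofNat_eq_natCast]; omega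
      rw [if_neg hc, if_neg h1, pvShiftOfNat, ih (k/2) (by omega)]
      obtain ⟨m, rfl⟩ : ∃ m, k = 2*m+1 := ⟨k/2, by omega⟩
      have h2 : (2*m+1)/2 = m := by omega
      have h3 : 2*m+1+1 = 2*(m+1) := by omega
      rw [h2, h3, ldiff_two_mul_even_odd]
      push_cast; ring

theorem solutionLoop_negSucc (p : Nat) (hp : 1 ≤ p) : ∀ b : Int,
    solutionLoop (Int.negSucc p) b = b * ((Nat.ldiff p (p-1) : Nat) : Int) := by
  induction p using Nat.strong_induction_on with
  | _ p ih =>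
    intro b
    rw [solutionLoop]
    by_cases h : p % 2 = 0
    · -- p even ⇒ negSucc p is odd ⇒ loop recurses
      have hc : ¬ (Int.negSucc p % 2 = 0) := by rw [Int.negSucc_eq]; omega
      have h1 : ¬ (Int.negSucc p = -1) := by rw [Int.negSucc_eq]; omega
      rw [if_neg hc, if_neg h1, pvShiftNegSucc, ih (p/2) (by omega) (by omega)]
      obtain ⟨q, rfl⟩ : ∃ q, p = 2*q := ⟨p/2, by omega⟩
      have hq : 1 ≤ q := by omega
      have h2 : (2*q)/2 = q := by omega
      have h3 : 2*q - 1 = 2*(q-1)+1 := by omega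
      rw [h2, h3, ldiff_two_mul_even_odd]
      push_cast; ring
    · -- p odd ⇒ negSucc p is even ⇒ loop breaks
      have hc : Int.negSucc p % 2 = 0 := by rw [Int.negSucc_eq]; omega
      rw [if_pos hc]
      obtain ⟨q, rfl⟩ : ∃ q, p = 2*q+1 := ⟨p/2, by omega⟩
      have h2 : 2*q+1-1 = 2*q := by omega
      rw [h2, ldiff_succ_even]
      simp

theorem loop_eq_land (n : Int) (h : n ≠ -1) :
    solutionLoop n 1 = Int.land (n + 1) (-n - 1) := by
  rcases n with k | p
  · have hpos : (Int.ofNat k) + 1 = Int.ofNat (k+1) := rfl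
    have hneg : -(Int.ofNat k) - 1 = Int.negSucc k := by
      rw [Int.negSucc_eq]; simp only [Int.ofNat_eq_natCast]; ring
    rw [solutionLoop_ofNat, hpos, hneg]
    show (1 : Int) * ((Nat.ldiff (k+1) k : Nat) : Int) = Int.ofNat (Nat.ldiff (k+1) k)
    simp [Int.ofNat_eq_natCast]
  · have hp : 1 ≤ p := by
      by_contra hq
      exact h (by rw [Int.negSucc_eq]; omega)
    have hpos : (Int.negSucc p) + 1 = Int.negSucc (p-1) := by
      rw [Int.negSucc_eq, Int.negSucc_eq]; push_cast [hp]; ring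
    have hneg : -(Int.negSucc p) - 1 = Int.ofNat p := by
      rw [Int.negSucc_eq]; simp only [Int.ofNat_eq_natCast]; ring
    rw [solutionLoop_negSucc p hp, hpos, hneg]
    show (1 : Int) * ((Nat.ldiff p (p-1) : Nat) : Int) = Int.ofNat (Nat.ldiff p (p-1))
    simp [Int.ofNat_eq_natCast]

theorem foldl_append_map {α β : Type} (f : α → β) :
    ∀ (l : List α) (acc : List β), l.foldl (fun a n => a ++ [f n]) acc = acc ++ l.map f := by
  intro l
  induction l with
  | nil => simp
  | cons x xs ih => intro acc; simp [List.foldl_cons, ih]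

-- ===== VERDICT (by name: the statement is the Claim_ definition above) =====
theorem solution_spec : Claim_equal_solution := by
  intro numbers _ hpre
  unfold Spec_solution solution solution_alt
  rw [foldl_append_map, List.nil_append]
  apply List.map_congr_left
  intro n hn
  rw [loop_eq_land n (hpre n hn)]
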